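-- pv_equiv track=rewrite | github.com/MilaDog/everybody_codes | src/python/2025/11/day11.py | _perform_phase_two
-- ===== SOURCE A (Python) =====
-- def _perform_phase_two(
--     previous_formation: list[int]
-- ) -> tuple[bool, list[int]]:
--     """Perform the second phase of movements.
--
--     Args:
--         previous_formation (list[int]): Previous flock formation.
--
--     Returns:
--         tuple[bool, list[int]]: New formation if a change was made, else the previous formation.
--     """
--     new_formation: list[int] = previous_formation[::]
--
--     moved: bool = False
--     for i in range(len(new_formation) - 1):
--         if new_formation[i + 1] > new_formation[i]:
--             moved = True
--             new_formation[i] += 1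
--             new_formation[i + 1] -= 1
--
--     if moved:
--         return True, new_formation
--
--     return False, previous_formation
-- ===== SOURCE B (Python) =====
-- def _perform_phase_two(
--     previous_formation: list[int]
-- ) -> tuple[bool, list[int]]:
--     """Staged closed-form algorithm: pair i transfers one unit iff the last
--     nonzero adjacent difference at or before i is positive.  Compute the diff
--     array, derive the transfer flags from it, then apply all +-1 adjustments
--     to the original values at once."""
--     if len(previous_formation) < 2:
--         return False, previous_formation
--     diffs = [b - a for a, b in zip(previous_formation, previous_formation[1:])]
--     flags = []
--     last = 0
--     for d in diffs:
--         if d != 0: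
--             last = d
--         flags.append(last > 0)
--     if not any(flags):
--         return False, previous_formation
--     gains = flags + [False]
--     losses = [False] + flags
--     new_formation = [v + int(g) - int(l)
--                      for v, g, l in zip(previous_formation, gains, losses)]
--     return True, new_formation
-- ===== Notes on version B (the rewrite author's own statement) =====
-- stated objective: alternative
-- what changed: Replaces A's sequential copy-and-mutate-in-place pass with a staged closed-form algorithm: compute the adjacent-difference array, derive per-pair transfer flags by the rule 'the last nonzero difference at or before this pair is positive', then apply all +1/-1 adjustments to the original values in one vectorized zip.
import Mathlib
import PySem

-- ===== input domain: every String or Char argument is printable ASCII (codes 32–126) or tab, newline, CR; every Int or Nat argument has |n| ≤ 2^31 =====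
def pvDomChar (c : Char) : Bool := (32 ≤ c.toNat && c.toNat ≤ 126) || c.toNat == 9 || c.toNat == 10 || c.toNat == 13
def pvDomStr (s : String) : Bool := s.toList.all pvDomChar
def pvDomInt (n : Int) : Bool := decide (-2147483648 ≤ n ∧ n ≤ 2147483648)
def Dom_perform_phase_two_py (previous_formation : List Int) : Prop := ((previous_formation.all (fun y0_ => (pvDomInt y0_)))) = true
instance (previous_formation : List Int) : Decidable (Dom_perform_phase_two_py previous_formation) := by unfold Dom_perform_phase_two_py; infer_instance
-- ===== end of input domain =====

-- B replaces A's sequential copy-and-mutate pass by a staged closed-form algorithm: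
-- diff array -> transfer flags (last nonzero diff positive) -> apply all ±1 at once
-- (objective: alternative, same cost).

-- ===== PORT A =====
-- loop body of A: at index i, compare new_formation[i+1] > new_formation[i] and mutate in place
def pvStepA (st : List Int × Bool) (i : Nat) : List Int × Bool :=
  let nf := st.1
  if nf.getD (i + 1) 0 > nf.getD i 0 then
    let nf1 := nf.set i (nf.getD i 0 + 1)
    let nf2 := nf1.set (i + 1) (nf1.getD (i + 1) 0 - 1)
    (nf2, true)
  else st

def perform_phase_two_py (previous_formation : List Int) : Bool × List Int :=
  let r := (List.range (previous_formation.length - 1)).foldl pvStepA (previous_formation, false)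
  if r.2 then (true, r.1) else (false, previous_formation)

-- ===== PORT B =====
-- flags loop of B: carry the last nonzero diff, emit whether it is positive
def pvFlagsGo (diffs : List Int) (last : Int) : List Bool :=
  match diffs with
  | [] => []
  | d :: t =>
    let last' := if d ≠ 0 then d else last
    decide (last' > 0) :: pvFlagsGo t last'

def perform_phase_two_py_alt (previous_formation : List Int) : Bool × List Int :=
  if previous_formation.length < 2 then (false, previous_formation)
  else
    let diffs := (previous_formation.zip previous_formation.tail).map (fun p => p.2 - p.1)
    let flags := pvFlagsGo diffs 0
    if !(flags.any id) then (false, previous_formation)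
    else
      let gains := flags ++ [false]
      let losses := false :: flags
      let new_formation := (previous_formation.zip (gains.zip losses)).map
        (fun p => p.1 + (if p.2.1 then (1 : Int) else 0) - (if p.2.2 then (1 : Int) else 0))
      (true, new_formation)

-- ===== PRECONDITION & SPEC =====
def Spec_perform_phase_two_py (previous_formation : List Int) (out : Bool × List Int) : Prop := out = perform_phase_two_py_alt previous_formation
instance (previous_formation : List Int) (out : Bool × List Int) : Decidable (Spec_perform_phase_two_py previous_formation out) := by unfold Spec_perform_phase_two_py; infer_instance

-- ===== CLAIM (what is proved, stated in full; the proofs are below) =====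
def Claim_equal_perform_phase_two_py : Prop := ∀ (previous_formation : List Int), Dom_perform_phase_two_py previous_formation → Spec_perform_phase_two_py previous_formation (perform_phase_two_py previous_formation)

-- ===== LEMMAS AND PROOFS =====

-- proof-only helpers
def pvB2I (b : Bool) : Int := if b then 1 else 0

def pvDiffs (l : List Int) : List Int := (l.zip l.tail).map (fun p => p.2 - p.1)

-- the sequential carry pass, intermediate between A's in-place fold and B's staged form
def pvAltGo (cur : Int) (rest : List Int) (acc : List Int) (moved : Bool) : Bool × List Int :=
  match rest with
  | [] => (moved, acc ++ [cur])
  | nxt :: t =>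
    if nxt > cur then pvAltGo (nxt - 1) t (acc ++ [cur + 1]) true
    else pvAltGo nxt t (acc ++ [cur]) moved

-- recursive form of B's final zipped build
def pvRebuild (orig : Int) (t : List Int) (last : Int) : List Int :=
  match t with
  | [] => [orig - pvB2I (decide (last > 0))]
  | nxt :: t' =>
    let last' := if nxt - orig ≠ 0 then nxt - orig else last
    (orig - pvB2I (decide (last > 0)) + pvB2I (decide (last' > 0))) :: pvRebuild nxt t' last'

theorem pvLoop_eq (t : List Int) : ∀ (cur : Int) (acc : List Int) (moved : Bool),
    (List.range' acc.length t.length).foldl pvStepA (acc ++ cur :: t, moved)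
      = ((pvAltGo cur t acc moved).2, (pvAltGo cur t acc moved).1) := by
  induction t with
  | nil => intro cur acc moved; simp [pvAltGo]
  | cons nxt t ih =>
    intro cur acc moved
    simp only [List.length_cons, List.range'_succ]
    have hget1 : (acc ++ cur :: nxt :: t).getD acc.length 0 = cur := by
      simp [List.getD]
    have hget2 : (acc ++ cur :: nxt :: t).getD (acc.length + 1) 0 = nxt := by
      simp [List.getD]
    by_cases h : nxt > cur
    · have hstep : pvStepA (acc ++ cur :: nxt :: t, moved) acc.length
          = ((acc ++ [cur + 1]) ++ (nxt - 1) :: t, true) := by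
        simp only [pvStepA, hget1, hget2]
        rw [if_pos h]
        have hset1 : (acc ++ cur :: nxt :: t).set acc.length (cur + 1)
            = acc ++ (cur + 1) :: nxt :: t := by
          rw [List.set_append]; simp
        rw [hset1]
        have hget2' : (acc ++ (cur + 1) :: nxt :: t).getD (acc.length + 1) 0 = nxt := by
          simp [List.getD]
        rw [hget2']
        have hset2 : (acc ++ (cur + 1) :: nxt :: t).set (acc.length + 1) (nxt - 1)
            = acc ++ (cur + 1) :: (nxt - 1) :: t := by
          rw [List.set_append]; simp [List.set]
        rw [hset2]
        simp
      simp only [List.foldl_cons, hstep]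
      have := ih (nxt - 1) (acc ++ [cur + 1]) true
      simp only [List.length_append, List.length_cons, List.length_nil] at this ⊢
      rw [show acc.length + 1 = acc.length + (0 + 1) by omega] at this
      simpa [pvAltGo, h, List.append_assoc] using this
    · have hstep : pvStepA (acc ++ cur :: nxt :: t, moved) acc.length
          = ((acc ++ [cur]) ++ nxt :: t, moved) := by
        simp only [pvStepA, hget1, hget2]
        rw [if_neg h]
        simp
      simp only [List.foldl_cons, hstep]
      have := ih nxt (acc ++ [cur]) moved
      simp only [List.length_append, List.length_cons, List.length_nil] at this ⊢
      rw [show acc.length + 1 = acc.length + (0 + 1) by omega] at this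
      simpa [pvAltGo, h, List.append_assoc] using this

-- the carry pass equals the flags/rebuild staged form
theorem pvCarry_eq_flags (t : List Int) : ∀ (orig last : Int) (acc : List Int) (moved : Bool),
    pvAltGo (orig - pvB2I (decide (last > 0))) t acc moved
      = (moved || (pvFlagsGo (pvDiffs (orig :: t)) last).any id, acc ++ pvRebuild orig t last) := by
  induction t with
  | nil =>
    intro orig last acc moved
    simp [pvAltGo, pvDiffs, pvFlagsGo, pvRebuild]
  | cons nxt t ih =>
    intro orig last acc moved
    have hdiffs : pvDiffs (orig :: nxt :: t) = (nxt - orig) :: pvDiffs (nxt :: t) := by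
      simp [pvDiffs]
    set last' : Int := if nxt - orig ≠ 0 then nxt - orig else last with hlast'
    have hcond : (nxt > orig - pvB2I (decide (last > 0))) ↔ (decide (last' > 0) = true) := by
      rw [hlast']
      by_cases hd : nxt - orig ≠ 0 <;> by_cases hl : last > 0 <;>
        simp [pvB2I, hd, hl] <;> omega
    by_cases h : nxt > orig - pvB2I (decide (last > 0))
    · have hf : decide (last' > 0) = true := hcond.mp h
      have hstep : pvAltGo (orig - pvB2I (decide (last > 0))) (nxt :: t) acc moved
          = pvAltGo (nxt - 1) t (acc ++ [orig - pvB2I (decide (last > 0)) + 1]) true := by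
        simp [pvAltGo, h]
      rw [hstep]
      have h1 : nxt - 1 = nxt - pvB2I (decide (last' > 0)) := by simp [pvB2I, hf]
      rw [h1, ih nxt last' (acc ++ [orig - pvB2I (decide (last > 0)) + 1]) true]
      rw [hdiffs]
      simp [pvFlagsGo, pvRebuild, ← hlast', hf, pvB2I, List.append_assoc]
    · have hf : decide (last' > 0) = false := by
        cases hb : decide (last' > 0)
        · rfl
        · exact absurd (hcond.mpr hb) h
      have hstep : pvAltGo (orig - pvB2I (decide (last > 0))) (nxt :: t) acc moved
          = pvAltGo nxt t (acc ++ [orig - pvB2I (decide (last > 0))]) moved := by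
        simp [pvAltGo, h]
      rw [hstep]
      have h1 : nxt = nxt - pvB2I (decide (last' > 0)) := by simp [pvB2I, hf]
      have hih := ih nxt last' (acc ++ [orig - pvB2I (decide (last > 0))]) moved
      rw [← h1] at hih
      rw [hih, hdiffs]
      simp [pvFlagsGo, pvRebuild, ← hlast', hf, pvB2I, List.append_assoc]

-- the recursive rebuild equals B's zipped comprehension
theorem pvRebuild_eq_zip (t : List Int) : ∀ (orig last : Int),
    ((orig :: t).zip ((pvFlagsGo (pvDiffs (orig :: t)) last ++ [false]).zip
        (decide (last > 0) :: pvFlagsGo (pvDiffs (orig :: t)) last))).map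
      (fun p => p.1 + (if p.2.1 then (1 : Int) else 0) - (if p.2.2 then (1 : Int) else 0))
      = pvRebuild orig t last := by
  induction t with
  | nil =>
    intro orig last
    simp [pvDiffs, pvFlagsGo, pvRebuild, pvB2I]
  | cons nxt t ih =>
    intro orig last
    have hdiffs : pvDiffs (orig :: nxt :: t) = (nxt - orig) :: pvDiffs (nxt :: t) := by
      simp [pvDiffs]
    rw [hdiffs]
    set last' : Int := if nxt - orig ≠ 0 then nxt - orig else last with hlast'
    have hflags : pvFlagsGo ((nxt - orig) :: pvDiffs (nxt :: t)) last
        = decide (last' > 0) :: pvFlagsGo (pvDiffs (nxt :: t)) last' := by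
      simp [pvFlagsGo, ← hlast']
    rw [hflags]
    simp only [List.cons_append, List.zip_cons_cons, List.map_cons]
    rw [ih nxt last']
    show (orig + _ - _) :: _ = pvRebuild orig (nxt :: t) last
    simp [pvRebuild, ← hlast', pvB2I]
    split <;> split <;> omega

-- ===== VERDICT (by name: the statement is the Claim_ definition above) =====
theorem perform_phase_two_py_spec : Claim_equal_perform_phase_two_py := by
  unfold Claim_equal_perform_phase_two_py
  intro l _
  unfold Spec_perform_phase_two_py
  match l with
  | [] => rfl
  | [a] => rfl
  | a :: b :: t =>
    show perform_phase_two_py (a :: b :: t) = perform_phase_two_py_alt (a :: b :: t)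
    have hA := pvLoop_eq (b :: t) a [] false
    simp only [List.length_nil, List.nil_append, List.length_cons] at hA
    have hcarry := pvCarry_eq_flags (b :: t) a 0 [] false
    have h0 : a - pvB2I (decide ((0:Int) > 0)) = a := by simp [pvB2I]
    rw [h0] at hcarry
    simp only [pvDiffs, List.tail_cons, Bool.false_or, List.nil_append] at hcarry
    have hzip := pvRebuild_eq_zip (b :: t) a 0
    have h0' : decide ((0:Int) > 0) = false := by decide
    rw [h0'] at hzip
    simp only [pvDiffs, List.tail_cons] at hzip
    unfold perform_phase_two_py perform_phase_two_py_alt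
    simp only [List.length_cons, Nat.add_sub_cancel, List.range_eq_range', List.tail_cons, hA]
    rw [if_neg (show ¬ t.length + 1 + 1 < 2 by omega)]
    by_cases hm : true ∈ pvFlagsGo ((b - a) :: List.map (fun p => p.2 - p.1) ((b :: t).zip t)) 0
    · simp only [List.zip_cons_cons, List.map_cons] at hzip
      simp [hcarry, hm, hzip]
    · simp [hcarry, hm]
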